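-- pv_equiv track=rewrite | github.com/thbaylson/Natural-Language-Processing | src/capstone.py | get_target_resource
-- ===== SOURCE A (Python) =====
-- def get_target_resource(inp: dict, files: list, folders: list, exts: list) -> dict:
--     """
--     If a specific file referenced, search locally for the file, confirm it exists, and append:
--     (X target_resource (name: document))
--
--     If a specific folder referenced, search locally for the folder, confirm it exists, and append:
--     (X target_resource (case: folder))
--
--     If no specific file or folder, but items of that type exist in directory, append:
--     (X target_resource (case: filetype))
--
--     TODO: Clean up this function
--     TODO: Will need to test this against things like bob.docx, etc.
--     """
--     target = ""
--     target_type = ""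
--     resource_found = False
--     resource_data = {}
--
--     # Search specific reference and specific folders
--     for word in inp:
--         if word in files:
--             target = word
--             target_type = "file"
--             resource_found = True
--     if not resource_found:
--         # Search specific folders
--         for word in inp:
--             if word in folders:
--                 target = word
--                 target_type = "case"
--                 resource_found = True
--     if not resource_found:
--         # Search filetype reference
--         for word in inp:
--             if word in exts:
--                 target = word
--                 target_type = "case"
--
--     # Make correct info appendable
--     resource_data[target] = target_type
--     return resource_data
-- ===== SOURCE B (Python) =====
-- def get_target_resource(inp: dict, files: list, folders: list, exts: list) -> dict:
--     # One pass over the words, remembering the last word seen in each category,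
--     # then pick by priority file > folder > ext.
--     fset = set(files)
--     dset = set(folders)
--     eset = set(exts)
--     last_file = None
--     last_folder = None
--     last_ext = None
--     for word in inp:
--         if word in fset:
--             last_file = word
--         if word in dset:
--             last_folder = word
--         if word in eset:
--             last_ext = word
--     if last_file is not None:
--         return {last_file: "file"}
--     if last_folder is not None:
--         return {last_folder: "case"}
--     if last_ext is not None:
--         return {last_ext: "case"}
--     return {"": ""}
-- ===== Notes on version B (the rewrite author's own statement) =====
-- stated objective: faster
-- what changed: B replaces A's three sequential guarded linear-scan passes (files, then folders, then exts, each with a found-flag) by building one set per category and a single pass recording the last match per category, selecting by priority afterwards.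
import Mathlib
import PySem

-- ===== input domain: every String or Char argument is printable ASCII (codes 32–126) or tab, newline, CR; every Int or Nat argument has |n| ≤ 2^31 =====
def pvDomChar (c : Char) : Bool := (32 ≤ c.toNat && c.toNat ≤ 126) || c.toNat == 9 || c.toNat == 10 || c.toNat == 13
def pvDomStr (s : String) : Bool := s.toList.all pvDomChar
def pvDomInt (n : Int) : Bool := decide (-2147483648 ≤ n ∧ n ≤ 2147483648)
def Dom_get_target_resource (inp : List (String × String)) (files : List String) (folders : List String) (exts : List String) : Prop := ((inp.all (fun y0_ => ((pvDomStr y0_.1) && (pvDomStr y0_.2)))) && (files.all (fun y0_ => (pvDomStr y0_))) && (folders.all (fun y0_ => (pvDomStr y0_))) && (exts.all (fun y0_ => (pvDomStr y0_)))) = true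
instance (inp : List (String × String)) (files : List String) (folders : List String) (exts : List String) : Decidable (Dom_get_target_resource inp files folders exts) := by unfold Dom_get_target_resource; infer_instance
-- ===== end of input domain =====

-- B (faster, measured): replaces A's three sequential guarded list-scan passes by per-category sets and a single pass; return-value equivalence only
-- (neither program mutates its arguments). `inp` is a Python dict, so iteration is over its keys:
-- both ports iterate over the first-occurrence-deduplicated keys (PySem.List.dedup).

-- ===== PORT A =====
-- A: pass over words marking the last word in `files` (flag found); if not found, a second pass
-- for `folders`; if still not found, a third pass for `exts` (which does not set the flag).
def get_target_resource (inp : List (String × String)) (files : List String) (folders : List String) (exts : List String) : List (String × String) :=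
  let words := PySem.List.dedup (inp.map Prod.fst)
  -- target = "", target_type = "", resource_found = False, threaded as a triple
  let s1 := words.foldl (fun (st : String × String × Bool) w =>
      if files.contains w then (w, "file", true) else st) ("", "", false)
  let s2 := if s1.2.2 then s1 else
      words.foldl (fun (st : String × String × Bool) w =>
        if folders.contains w then (w, "case", true) else st) s1
  let s3 := if s2.2.2 then s2 else
      words.foldl (fun (st : String × String × Bool) w =>
        if exts.contains w then (w, "case", st.2.2) else st) s2
  [(s3.1, s3.2.1)]

-- ===== PORT B =====
-- B: build one set per category, then one pass remembering the last word seen in each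
-- category, and pick by priority.
def get_target_resource_alt (inp : List (String × String)) (files : List String) (folders : List String) (exts : List String) : List (String × String) :=
  let fset := PySem.Set.ofList files
  let dset := PySem.Set.ofList folders
  let eset := PySem.Set.ofList exts
  let words := PySem.List.dedup (inp.map Prod.fst)
  let r := words.foldl (fun (st : Option String × Option String × Option String) w =>
      let st := if fset.contains w then (some w, st.2.1, st.2.2) else st
      let st := if dset.contains w then (st.1, some w, st.2.2) else st
      if eset.contains w then (st.1, st.2.1, some w) else st)
    (none, none, none)
  match r with
  | (some f, _, _) => [(f, "file")]
  | (none, some d, _) => [(d, "case")]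
  | (none, none, some e) => [(e, "case")]
  | (none, none, none) => [("", "")]

-- ===== PRECONDITION & SPEC =====
def Spec_get_target_resource (inp : List (String × String)) (files : List String) (folders : List String) (exts : List String) (out : List (String × String)) : Prop := out = get_target_resource_alt inp files folders exts
instance (inp : List (String × String)) (files : List String) (folders : List String) (exts : List String) (out : List (String × String)) : Decidable (Spec_get_target_resource inp files folders exts out) := by unfold Spec_get_target_resource; infer_instance

-- ===== CLAIM (what is proved, stated in full; the proofs are below) =====
def Claim_equal_get_target_resource : Prop := ∀ (inp : List (String × String)) (files : List String) (folders : List String) (exts : List String), Dom_get_target_resource inp files folders exts → Spec_get_target_resource inp files folders exts (get_target_resource inp files folders exts)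

-- ===== LEMMAS AND PROOFS =====

-- A "keep the last match" fold is determined by the last element of the filtered list.
theorem foldl_if_last {σ : Type} (p : String → Bool) (g : String → σ) (st : σ) (ws : List String) :
    ws.foldl (fun s w => if p w then g w else s) st = ((ws.filter p).getLast?).elim st g := by
  induction ws generalizing st with
  | nil => rfl
  | cons w ws ih =>
    simp only [List.foldl_cons, List.filter_cons]
    by_cases h : p w
    · simp only [h, if_pos, ih, List.getLast?_cons]
      cases (ws.filter p).getLast? <;> rfl
    · simp [h, ih]

-- set(l) and l agree on membership.
theorem contains_ofList (l : List String) (w : String) : (PySem.Set.ofList l).contains w = l.contains w := by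
  simp [PySem.Set.mem_ofList]

-- The three components of B's combined fold evolve independently.
theorem alt_fold_proj (pf pd pe : String → Bool) (st : Option String × Option String × Option String)
    (ws : List String) :
    ws.foldl (fun (st : Option String × Option String × Option String) w =>
      let st := if pf w then (some w, st.2.1, st.2.2) else st
      let st := if pd w then (st.1, some w, st.2.2) else st
      if pe w then (st.1, st.2.1, some w) else st) st
    = (ws.foldl (fun s w => if pf w then some w else s) st.1,
       ws.foldl (fun s w => if pd w then some w else s) st.2.1,
       ws.foldl (fun s w => if pe w then some w else s) st.2.2) := by
  induction ws generalizing st with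
  | nil => rfl
  | cons w ws ih =>
    simp only [List.foldl_cons]
    rw [ih]
    split_ifs <;> rfl

-- A's third loop writes `st.2.2` into the flag; on a state whose flag is false it stays false.
theorem loop3_flag_false (p : String → Bool) (ws : List String) (a b : String) :
    ws.foldl (fun (st : String × String × Bool) w => if p w then (w, "case", st.2.2) else st) (a, b, false)
      = ws.foldl (fun (st : String × String × Bool) w => if p w then (w, "case", false) else st) (a, b, false) := by
  induction ws generalizing a b with
  | nil => rfl
  | cons w ws ih =>
    simp only [List.foldl_cons]
    by_cases h : p w <;> simp [h, ih]

-- ===== VERDICT (by name: the statement is the Claim_ definition above) =====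
theorem get_target_resource_spec : Claim_equal_get_target_resource := by
  intro inp files folders exts _
  simp only [Spec_get_target_resource, get_target_resource, get_target_resource_alt]
  rw [alt_fold_proj]
  simp only [contains_ofList]
  rw [foldl_if_last (fun w => files.contains w) (fun w => (w, "file", true)),
      foldl_if_last (fun w => files.contains w) some,
      foldl_if_last (fun w => folders.contains w) some,
      foldl_if_last (fun w => exts.contains w) some]
  set ws := PySem.List.dedup (inp.map Prod.fst) with hws
  cases hf : (ws.filter (fun w => files.contains w)).getLast? with
  | some w => simp
  | none =>
    simp only [Option.elim]
    rw [foldl_if_last (fun w => folders.contains w) (fun w => (w, "case", true))]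
    cases hd : (ws.filter (fun w => folders.contains w)).getLast? with
    | some w => simp
    | none =>
      simp only [Option.elim, Bool.false_eq_true, if_false]
      rw [loop3_flag_false, foldl_if_last (fun w => exts.contains w) (fun w => (w, "case", false))]
      cases he : (ws.filter (fun w => exts.contains w)).getLast? <;> simp
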